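-- pv_equiv track=rewrite | github.com/Fdondi/hackaton-gocalm | multihead_pii/decoder.py | _trim_char_span
-- ===== SOURCE A (Python) =====
-- from typing import Dict, List, Optional, Tuple
--
-- def _trim_char_span(text: str, start: int, end: int) -> Optional[Tuple[int, int]]:
--     safe_start = max(0, min(start, len(text)))
--     safe_end = max(safe_start, min(end, len(text)))
--     while safe_start < safe_end and text[safe_start].isspace():
--         safe_start += 1
--     while safe_end > safe_start and text[safe_end - 1].isspace():
--         safe_end -= 1
--     if safe_end <= safe_start:
--         return None
--     return safe_start, safe_end
-- ===== SOURCE B (Python) =====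
-- def _trim_char_span(text, start, end):
--     safe_start = max(0, min(start, len(text)))
--     safe_end = max(safe_start, min(end, len(text)))
--     sub = text[safe_start:safe_end]
--     stripped = sub.strip()
--     if not stripped:
--         return None
--     new_start = safe_start + (len(sub) - len(sub.lstrip()))
--     return new_start, new_start + len(stripped)
-- ===== Notes on version B (the rewrite author's own statement) =====
-- stated objective: idiomatic
-- what changed: Replaces the two index-advancing while loops with a slice plus str.strip/lstrip: the trimmed span is recovered from the lengths of the stripped substrings.
import Mathlib
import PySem

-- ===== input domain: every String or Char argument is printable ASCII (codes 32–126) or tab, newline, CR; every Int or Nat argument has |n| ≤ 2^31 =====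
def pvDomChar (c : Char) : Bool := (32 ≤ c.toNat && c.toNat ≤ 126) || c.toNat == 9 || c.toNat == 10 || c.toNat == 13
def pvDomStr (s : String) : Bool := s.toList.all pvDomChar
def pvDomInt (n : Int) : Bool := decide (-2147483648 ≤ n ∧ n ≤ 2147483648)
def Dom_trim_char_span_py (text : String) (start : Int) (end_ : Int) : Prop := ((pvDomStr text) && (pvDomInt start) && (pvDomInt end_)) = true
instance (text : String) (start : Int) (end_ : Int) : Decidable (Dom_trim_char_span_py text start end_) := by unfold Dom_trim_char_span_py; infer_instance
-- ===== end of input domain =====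

-- B replaces A's two character-scanning while loops with a slice plus strip/lstrip,
-- recovering the span from the lengths of the stripped substrings (idiomatic; same cost).

-- ===== PORT A =====
-- first while loop: advance safe_start over whitespace (cs.getD s ' ' is exact: the loop
-- condition s < e ≤ len guarantees the index is in range, so Python never raises here)
def pvFwd (cs : List Char) (s e : Nat) : Nat :=
  if _h : s < e then
    if PySem.Chars.isspace (cs.getD s ' ') then pvFwd cs (s + 1) e else s
  else s
termination_by e - s

-- second while loop: retreat safe_end over whitespace (index e - 1 in range likewise)
def pvBwd (cs : List Char) (s e : Nat) : Nat :=
  if _h : s < e then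
    if PySem.Chars.isspace (cs.getD (e - 1) ' ') then pvBwd cs s (e - 1) else e
  else e
termination_by e

def trim_char_span_py (text : String) (start : Int) (end_ : Int) : Option (Int × Int) :=
  let cs := text.toList
  let n : Int := cs.length
  let safe_start := max 0 (min start n)
  let safe_end := max safe_start (min end_ n)
  let s1 := pvFwd cs safe_start.toNat safe_end.toNat
  let e1 := pvBwd cs s1 safe_end.toNat
  if e1 ≤ s1 then none else some ((s1 : Int), (e1 : Int))

-- ===== PORT B =====
def trim_char_span_py_alt (text : String) (start : Int) (end_ : Int) : Option (Int × Int) :=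
  let n := PySem.Str.len text
  let safe_start := max 0 (min start n)
  let safe_end := max safe_start (min end_ n)
  let sub := PySem.Str.slice text (some safe_start) (some safe_end)
  let stripped := PySem.Str.strip sub
  if PySem.Str.len stripped = 0 then none
  else
    let new_start := safe_start + (PySem.Str.len sub - PySem.Str.len (PySem.Str.lstrip sub))
    some (new_start, new_start + PySem.Str.len stripped)

-- ===== PRECONDITION & SPEC =====
def Spec_trim_char_span_py (text : String) (start : Int) (end_ : Int) (out : Option (Int × Int)) : Prop := out = trim_char_span_py_alt text start end_
instance (text : String) (start : Int) (end_ : Int) (out : Option (Int × Int)) : Decidable (Spec_trim_char_span_py text start end_ out) := by unfold Spec_trim_char_span_py; infer_instance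

-- ===== CLAIM (what is proved, stated in full; the proofs are below) =====
def Claim_equal_trim_char_span_py : Prop := ∀ (text : String) (start : Int) (end_ : Int), Dom_trim_char_span_py text start end_ → Spec_trim_char_span_py text start end_ (trim_char_span_py text start end_)

-- ===== LEMMAS AND PROOFS =====

-- dropWhile is "drop the takeWhile prefix"
theorem pv_dropWhile_eq_drop {α : Type} (p : α → Bool) (l : List α) :
    l.dropWhile p = l.drop (l.takeWhile p).length := by
  induction l with
  | nil => rfl
  | cons a l ih => by_cases h : p a <;> simp [h, ih]

-- the forward loop lands at start + (number of leading whitespace chars of the segment)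
theorem pvFwd_eq (cs : List Char) (s e : Nat) (he : e ≤ cs.length) :
    pvFwd cs s e = s + (((cs.drop s).take (e - s)).takeWhile PySem.Chars.isspace).length := by
  fun_induction pvFwd cs s e with
  | case1 s h hsp ih =>
    have hs : s < cs.length := lt_of_lt_of_le h he
    rw [List.drop_eq_getElem_cons hs]
    have h1 : e - s = (e - (s + 1)) + 1 := by omega
    rw [h1]
    simp only [List.take_succ_cons, List.takeWhile_cons]
    rw [List.getD_eq_getElem cs ' ' hs] at hsp
    simp only [hsp, if_true, List.length_cons]
    rw [ih]
    omega
  | case2 s h hsp =>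
    have hs : s < cs.length := lt_of_lt_of_le h he
    rw [List.drop_eq_getElem_cons hs]
    have h1 : e - s = (e - (s + 1)) + 1 := by omega
    rw [h1]
    simp only [List.take_succ_cons, List.takeWhile_cons]
    rw [List.getD_eq_getElem cs ' ' hs] at hsp
    simp [hsp]
  | case3 s h =>
    have h1 : e - s = 0 := by omega
    simp [h1]

-- the backward loop lands at start + (length of the right-stripped segment)
theorem pvBwd_eq (cs : List Char) (s e : Nat) (hse : s ≤ e) (he : e ≤ cs.length) :
    pvBwd cs s e = s + (PySem.Chars.rstrip ((cs.drop s).take (e - s))).length := by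
  fun_induction pvBwd cs s e with
  | case1 e h hsp ih =>
    have hlt : e - 1 < cs.length := by omega
    have h2 : e - 1 - s < (cs.drop s).length := by rw [List.length_drop]; omega
    have h3 : (cs.drop s)[e - 1 - s] = cs[e - 1] := by
      rw [List.getElem_drop]; congr 1; omega
    have hseg : (cs.drop s).take (e - s) = (cs.drop s).take (e - 1 - s) ++ [cs[e - 1]] := by
      have h1 : e - s = (e - 1 - s) + 1 := by omega
      rw [h1, List.take_succ_eq_append_getElem h2, h3]
    rw [hseg]
    rw [List.getD_eq_getElem cs ' ' hlt] at hsp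
    have hr : PySem.Chars.rstrip ((cs.drop s).take (e - 1 - s) ++ [cs[e - 1]])
        = PySem.Chars.rstrip ((cs.drop s).take (e - 1 - s)) := by
      unfold PySem.Chars.rstrip
      simp [hsp]
    rw [hr, ih (by omega) (by omega)]
  | case2 e h hsp =>
    have hlt : e - 1 < cs.length := by omega
    rw [List.getD_eq_getElem cs ' ' hlt] at hsp
    have h2 : e - 1 - s < (cs.drop s).length := by rw [List.length_drop]; omega
    have h3 : (cs.drop s)[e - 1 - s] = cs[e - 1] := by
      rw [List.getElem_drop]; congr 1; omega
    have hseg : (cs.drop s).take (e - s) = (cs.drop s).take (e - 1 - s) ++ [cs[e - 1]] := by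
      have h1 : e - s = (e - 1 - s) + 1 := by omega
      rw [h1, List.take_succ_eq_append_getElem h2, h3]
    have hlast : PySem.Chars.rstrip ((cs.drop s).take (e - s)) = (cs.drop s).take (e - s) := by
      rw [hseg]
      unfold PySem.Chars.rstrip
      simp [hsp]
    rw [hlast, List.length_take, List.length_drop]
    omega
  | case3 e h =>
    have h1 : s = e := by omega
    subst h1
    simp [PySem.Chars.rstrip]

theorem trim_char_span_py_main (text : String) (start : Int) (end_ : Int) :
    trim_char_span_py text start end_ = trim_char_span_py_alt text start end_ := by
  dsimp only [trim_char_span_py, trim_char_span_py_alt]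
  simp only [PySem.Str.len]
  set cs := text.toList with hcs
  set n : Int := (cs.length : Int) with hn
  set ss : Int := max 0 (min start n) with hss
  set se : Int := max ss (min end_ n) with hse
  have hss0 : 0 ≤ ss := by rw [hss]; omega
  have hsse : ss ≤ se := by rw [hse]; omega
  have hsen : se ≤ n := by rw [hse, hss, hn]; omega
  set s0 : Nat := ss.toNat with hs0
  set e0 : Nat := se.toNat with he0
  have hcast_s : (s0 : Int) = ss := Int.toNat_of_nonneg hss0
  have hcast_e : (e0 : Int) = se := Int.toNat_of_nonneg (le_trans hss0 hsse)
  have hs0e0 : s0 ≤ e0 := by omega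
  have he0len : e0 ≤ cs.length := by omega
  -- the slice is the segment
  have hsub : (PySem.Str.slice text (some ss) (some se)).toList
      = (cs.drop s0).take (e0 - s0) := by
    simp only [PySem.Str.slice, String.toList_ofList, PySem.Chars.slice_eq_listSlice, ← hcs]
    rw [PySem.List.slice_toNat cs hss0 (le_trans hss0 hsse)]
  set l : List Char := (cs.drop s0).take (e0 - s0) with hl
  have hllen : l.length = e0 - s0 := by
    rw [hl, List.length_take, List.length_drop]; omega
  set p : Nat := (l.takeWhile PySem.Chars.isspace).length with hp
  have hple : p ≤ l.length := by
    rw [hp]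
    exact (List.takeWhile_prefix _).length_le
  -- forward loop
  have hfwd : pvFwd cs s0 e0 = s0 + p := by rw [pvFwd_eq cs s0 e0 he0len, ← hl, ← hp]
  -- the remaining segment is lstrip l
  have hrest : (cs.drop (s0 + p)).take (e0 - (s0 + p)) = PySem.Chars.lstrip l := by
    have h1 : PySem.Chars.lstrip l = l.drop p := by
      unfold PySem.Chars.lstrip
      rw [pv_dropWhile_eq_drop, ← hp]
    rw [h1, hl, List.drop_take, List.drop_drop]
    congr 1
    omega
  -- backward loop
  have hbwd : pvBwd cs (s0 + p) e0 = s0 + p + (PySem.Chars.strip l).length := by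
    rw [pvBwd_eq cs (s0 + p) e0 (by omega) he0len, hrest]
    rfl
  -- lstrip length
  have hlstrip : (PySem.Chars.lstrip l).length = l.length - p := by
    unfold PySem.Chars.lstrip
    rw [pv_dropWhile_eq_drop, ← hp, List.length_drop]
  have hstriple : (PySem.Chars.strip l).length ≤ (PySem.Chars.lstrip l).length := by
    have h := List.length_dropWhile_le PySem.Chars.isspace (PySem.Chars.lstrip l).reverse
    unfold PySem.Chars.strip PySem.Chars.rstrip
    simpa using h
  -- the stripped strings on the B side, at the List Char level
  have hstrip_list : (PySem.Str.strip (PySem.Str.slice text (some ss) (some se))).toList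
      = PySem.Chars.strip l := by
    simp [PySem.Str.strip, hsub]
  have hlstrip_list : (PySem.Str.lstrip (PySem.Str.slice text (some ss) (some se))).toList
      = PySem.Chars.lstrip l := by
    simp [PySem.Str.lstrip, hsub]
  rw [hfwd, hbwd, hstrip_list, hlstrip_list, hsub]
  by_cases hq : (PySem.Chars.strip l).length = 0
  · rw [if_pos (by omega), if_pos (by exact_mod_cast hq)]
  · rw [if_neg (by omega), if_neg (by exact_mod_cast hq)]
    simp only [Option.some.injEq, Prod.mk.injEq]
    constructor <;> omega

-- ===== VERDICT (by name: the statement is the Claim_ definition above) =====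
theorem trim_char_span_py_spec : Claim_equal_trim_char_span_py := by
  intro text start end_ _
  unfold Spec_trim_char_span_py
  exact trim_char_span_py_main text start end_
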